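-- pv_equiv track=rewrite | github.com/CCityCapital/SearchEngine | corpus_query/services/ingestion/chunk.py | chunk_file_by_line
-- ===== SOURCE A (Python) =====
-- from typing import Generator
--
-- def chunk_file_by_line(corpus_string: str) -> Generator[str, None, None]:
--     """
--     Chunk a corpus string into smaller strings.
--     """
--     prev_line = None
--     for line in corpus_string.split("\n"):
--         stripped_line = line.strip()
--         if len(stripped_line) == 0:
--             continue
--         if prev_line is not None:
--             yield " ".join([prev_line, stripped_line])
--
--         prev_line = stripped_line
-- ===== SOURCE B (Python) =====
-- def chunk_file_by_line(corpus_string: str):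
--     # Reversed traversal: walk the lines back-to-front carrying the NEXT
--     # non-empty stripped line, assemble the output in reverse, then flip it.
--     out = []
--     nxt = None
--     for line in reversed(corpus_string.split("\n")):
--         t = line.strip()
--         if t:
--             if nxt is not None:
--                 out.append(" ".join([t, nxt]))
--             nxt = t
--     yield from reversed(out)
-- ===== Notes on version B (the rewrite author's own statement) =====
-- stated objective: alternative
-- what changed: Replaces A's forward generator that remembers the previous non-empty line with a reversed traversal that carries the NEXT non-empty line, builds the output list back-to-front and reverses it once at the end.
import Mathlib
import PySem

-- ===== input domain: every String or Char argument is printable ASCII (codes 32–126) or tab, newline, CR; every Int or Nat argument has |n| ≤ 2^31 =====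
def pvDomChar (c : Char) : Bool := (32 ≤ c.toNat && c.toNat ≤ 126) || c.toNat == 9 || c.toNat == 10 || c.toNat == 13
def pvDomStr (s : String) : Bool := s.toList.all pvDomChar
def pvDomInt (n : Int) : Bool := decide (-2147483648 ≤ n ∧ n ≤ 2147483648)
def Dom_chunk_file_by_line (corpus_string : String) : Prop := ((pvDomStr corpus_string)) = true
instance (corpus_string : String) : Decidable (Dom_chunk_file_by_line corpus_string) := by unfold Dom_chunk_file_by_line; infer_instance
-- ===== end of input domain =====

-- B replaces A's forward prev-line generator with a reversed traversal carrying the NEXT non-empty line, building the output back-to-front (alternative decomposition, same cost).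

-- ===== PORT A =====
-- the generator loop: state is the Option-valued prev_line; yields are emitted in order
def chunkA_loop : Option String → List String → List String
  | _, [] => []
  | prev, l :: rest =>
    let stripped := PySem.Str.strip l
    if PySem.Str.len stripped == 0 then
      chunkA_loop prev rest
    else
      (match prev with
       | some p => [PySem.Str.join " " [p, stripped]]
       | none => []) ++ chunkA_loop (some stripped) rest

-- s.split("\n"): the separator is nonempty, so split? always returns some; getD is never the default
def chunk_file_by_line (corpus_string : String) : List String :=
  chunkA_loop none ((PySem.Str.split? corpus_string "\n").getD [])

-- ===== PORT B =====
-- one step of B's reversed loop: state is (out, nxt); Python's append is `++ [·]`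
def chunkB_step (st : List String × Option String) (line : String) : List String × Option String :=
  let t := PySem.Str.strip line
  if t == "" then st
  else
    (match st.2 with
     | some n => st.1 ++ [PySem.Str.join " " [t, n]]
     | none => st.1,
     some t)

def chunk_file_by_line_alt (corpus_string : String) : List String :=
  ((((PySem.Str.split? corpus_string "\n").getD []).reverse.foldl chunkB_step ([], none)).1).reverse

-- ===== PRECONDITION & SPEC =====
def Spec_chunk_file_by_line (corpus_string : String) (out : List String) : Prop := out = chunk_file_by_line_alt corpus_string
instance (corpus_string : String) (out : List String) : Decidable (Spec_chunk_file_by_line corpus_string out) := by unfold Spec_chunk_file_by_line; infer_instance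

-- ===== CLAIM (what is proved, stated in full; the proofs are below) =====
def Claim_equal_chunk_file_by_line : Prop := ∀ (corpus_string : String), Dom_chunk_file_by_line corpus_string → Spec_chunk_file_by_line corpus_string (chunk_file_by_line corpus_string)

-- ===== LEMMAS AND PROOFS =====

-- the non-empty stripped lines
def pvF (ls : List String) : List String :=
  (ls.map PySem.Str.strip).filter (fun s => !(s == ""))

-- adjacent pairs, joined
def adjP : List String → List String
  | a :: b :: rest => PySem.Str.join " " [a, b] :: adjP (b :: rest)
  | _ => []

theorem pvLen_eq_zero_iff (s : String) : (PySem.Str.len s == 0) = true ↔ s = "" := by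
  constructor
  · intro h
    simp only [beq_iff_eq, PySem.Str.len_eq] at h
    have hl : s.toList.length = 0 := by exact_mod_cast h
    exact String.toList_inj.mp (by simpa using List.length_eq_zero_iff.mp hl)
  · intro h; subst h; decide

theorem chunkA_loop_eq (ls : List String) :
    ∀ prev : Option String, chunkA_loop prev ls = adjP (prev.toList ++ pvF ls) := by
  induction ls with
  | nil => intro prev; cases prev <;> rfl
  | cons l rest ih =>
    intro prev
    by_cases hs : (PySem.Str.len (PySem.Str.strip l) == 0) = true
    · have hempty : PySem.Str.strip l = "" := (pvLen_eq_zero_iff _).mp hs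
      have hfil : pvF (l :: rest) = pvF rest := by simp [pvF, hempty]
      show chunkA_loop prev (l :: rest) = _
      unfold chunkA_loop
      rw [if_pos hs, ih prev, hfil]
    · have hne : PySem.Str.strip l ≠ "" := fun h => hs ((pvLen_eq_zero_iff _).mpr h)
      have hfil : pvF (l :: rest) = PySem.Str.strip l :: pvF rest := by simp [pvF, hne]
      cases prev with
      | none =>
        show chunkA_loop none (l :: rest) = _
        unfold chunkA_loop
        rw [if_neg hs, ih (some (PySem.Str.strip l)), hfil]
        rfl
      | some p =>
        show chunkA_loop (some p) (l :: rest) = _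
        unfold chunkA_loop
        rw [if_neg hs, ih (some (PySem.Str.strip l)), hfil]
        rfl

theorem chunkB_foldr_eq (ls : List String) :
    ls.foldr (fun x st => chunkB_step st x) ([], none)
      = ((adjP (pvF ls)).reverse, (pvF ls).head?) := by
  induction ls with
  | nil => rfl
  | cons l rest ih =>
    rw [List.foldr_cons, ih]
    by_cases hs : PySem.Str.strip l = ""
    · have hfil : pvF (l :: rest) = pvF rest := by simp [pvF, hs]
      rw [hfil]
      simp [chunkB_step, hs]
    · have hfil : pvF (l :: rest) = PySem.Str.strip l :: pvF rest := by simp [pvF, hs]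
      rw [hfil]
      cases hF : pvF rest with
      | nil => simp [chunkB_step, hs, adjP]
      | cons n F' => simp [chunkB_step, hs, adjP]

-- ===== VERDICT (by name: the statement is the Claim_ definition above) =====
theorem chunk_file_by_line_spec : Claim_equal_chunk_file_by_line := by
  intro s _
  show chunk_file_by_line s = chunk_file_by_line_alt s
  unfold chunk_file_by_line chunk_file_by_line_alt
  rw [chunkA_loop_eq, List.foldl_reverse, chunkB_foldr_eq]
  simp
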